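-- pv_equiv track=rewrite | github.com/Velcorn/AD | exercisesheet-01.2.py | find_sse
-- ===== SOURCE A (Python) =====
-- def find_sse(A):
--     if A[0] <= A[1]:
--         j = 0
--         i = 1
--     else:
--         j = 1
--         i = 0
--     for n in range(2, len(A)):
--         if A[n] < A[j]:
--             i = j
--             j = n
--         elif A[n] < A[i]:
--             i = n
--     return i
-- ===== SOURCE B (Python) =====
-- def find_sse(A):
--     return sorted(range(len(A)), key=lambda k: A[k])[1]
-- ===== Notes on version B (the rewrite author's own statement) =====
-- stated objective: idiomatic
-- what changed: Replaces the hand-written two-register tracking loop with a stable argsort of the indices by value, returning the second index of the sorted order.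
import Mathlib
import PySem

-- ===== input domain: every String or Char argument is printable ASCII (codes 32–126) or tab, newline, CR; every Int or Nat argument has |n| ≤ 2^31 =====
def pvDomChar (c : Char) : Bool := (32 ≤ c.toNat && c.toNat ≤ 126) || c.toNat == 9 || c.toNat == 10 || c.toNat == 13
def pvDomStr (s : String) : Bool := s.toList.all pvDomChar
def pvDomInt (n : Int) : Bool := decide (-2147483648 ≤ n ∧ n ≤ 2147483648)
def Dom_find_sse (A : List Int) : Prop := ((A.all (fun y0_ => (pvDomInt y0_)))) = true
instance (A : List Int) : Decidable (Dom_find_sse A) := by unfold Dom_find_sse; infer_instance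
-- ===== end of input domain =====

-- B replaces A's hand-written two-register tracking loop by a stable argsort of the
-- indices by value and returns its second element (idiomatic; not faster).

-- ===== PORT A =====
def find_sse (A : List Int) : Int :=
  let init : Int × Int :=
    if PySem.List.pyGetD A 0 0 ≤ PySem.List.pyGetD A 1 0 then (0, 1) else (1, 0)
  let s := (PySem.List.pyRange 2 (PySem.List.len A) 1).foldl
    (fun s n =>
      if PySem.List.pyGetD A n 0 < PySem.List.pyGetD A s.1 0 then (n, s.1)
      else if PySem.List.pyGetD A n 0 < PySem.List.pyGetD A s.2 0 then (s.1, n)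
      else s) init
  s.2

-- ===== PORT B =====
def find_sse_alt (A : List Int) : Int :=
  PySem.List.pyGetD
    (PySem.List.sorted (PySem.List.pyRange 0 (PySem.List.len A) 1)
      (fun k => PySem.List.pyGetD A k 0) false) 1 0

-- ===== PRECONDITION & SPEC =====
-- Pre_ excludes lists of length < 2, on which both A and B raise IndexError.
def Pre_find_sse (A : List Int) : Prop := 2 ≤ A.length
instance (A : List Int) : Decidable (Pre_find_sse A) := by unfold Pre_find_sse; infer_instance
def pvWitness_find_sse : List Int := [3, 1, 2]
def Spec_find_sse (A : List Int) (out : Int) : Prop := out = find_sse_alt A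
instance (A : List Int) (out : Int) : Decidable (Spec_find_sse A out) := by unfold Spec_find_sse; infer_instance

-- ===== CLAIM (what is proved, stated in full; the proofs are below) =====
def Claim_equal_find_sse : Prop := ∀ (A : List Int), Dom_find_sse A → Pre_find_sse A → Spec_find_sse A (find_sse A)

-- ===== LEMMAS AND PROOFS =====

-- sorted of an appended singleton is an insertion into the sorted list
theorem pv_sorted_append_singleton {α κ : Type} [LT κ] [DecidableLT κ]
    (xs : List α) (x : α) (key : α → κ) :
    PySem.List.sorted (xs ++ [x]) key false =
      PySem.List.insertBy (fun a b => decide (key a < key b)) x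
        (PySem.List.sorted xs key false) := by
  rw [PySem.List.sorted_eq_foldl_insertBy, List.foldl_append,
    ← PySem.List.sorted_eq_foldl_insertBy]
  rfl

-- the loop invariant: A's registers (j, i) are the first two elements of the stable
-- argsort of the indices 0 .. 2+m-1 by value
theorem pv_invariant (A : List Int) (m : Nat) :
    ∃ t, PySem.List.sorted (PySem.List.pyRange 0 (2 + (m : Int)) 1)
        (fun k => PySem.List.pyGetD A k 0) false =
      ((PySem.List.pyRange 2 (2 + (m : Int)) 1).foldl
        (fun s n =>
          if PySem.List.pyGetD A n 0 < PySem.List.pyGetD A s.1 0 then (n, s.1)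
          else if PySem.List.pyGetD A n 0 < PySem.List.pyGetD A s.2 0 then (s.1, n)
          else s)
        (if PySem.List.pyGetD A 0 0 ≤ PySem.List.pyGetD A 1 0 then ((0 : Int), (1 : Int)) else (1, 0))).1 ::
      ((PySem.List.pyRange 2 (2 + (m : Int)) 1).foldl
        (fun s n =>
          if PySem.List.pyGetD A n 0 < PySem.List.pyGetD A s.1 0 then (n, s.1)
          else if PySem.List.pyGetD A n 0 < PySem.List.pyGetD A s.2 0 then (s.1, n)
          else s)
        (if PySem.List.pyGetD A 0 0 ≤ PySem.List.pyGetD A 1 0 then ((0 : Int), (1 : Int)) else (1, 0))).2 :: t := by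
  induction m with
  | zero =>
    have h2 : PySem.List.pyRange 0 (2 + ((0 : Nat) : Int)) 1 = [0, 1] := by decide
    have h0 : PySem.List.pyRange 2 (2 + ((0 : Nat) : Int)) 1 = [] := by decide
    rw [h2, h0]
    by_cases h : PySem.List.pyGetD A 0 0 ≤ PySem.List.pyGetD A 1 0
    · exact ⟨[], by simp [PySem.List.sorted, PySem.List.insertBy, h, not_lt.2 h]⟩
    · exact ⟨[], by simp [PySem.List.sorted, PySem.List.insertBy, h, not_le.1 h]⟩
  | succ m ih =>
    obtain ⟨t, ht⟩ := ih
    have hb : (2 + ((m + 1 : Nat) : Int)) = (2 + (m : Int)) + 1 := by push_cast; ring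
    have hs0 : PySem.List.pyRange 0 (2 + ((m + 1 : Nat) : Int)) 1 =
        PySem.List.pyRange 0 (2 + (m : Int)) 1 ++ [2 + (m : Int)] := by
      rw [hb]; exact PySem.List.pyRange_one_succ_right (by omega)
    have hs2 : PySem.List.pyRange 2 (2 + ((m + 1 : Nat) : Int)) 1 =
        PySem.List.pyRange 2 (2 + (m : Int)) 1 ++ [2 + (m : Int)] := by
      rw [hb]; exact PySem.List.pyRange_one_succ_right (by omega)
    rw [hs0, hs2, pv_sorted_append_singleton, List.foldl_append, ht]
    simp only [List.foldl]
    generalize ((PySem.List.pyRange 2 (2 + (m : Int)) 1).foldl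
        (fun s n =>
          if PySem.List.pyGetD A n 0 < PySem.List.pyGetD A s.1 0 then (n, s.1)
          else if PySem.List.pyGetD A n 0 < PySem.List.pyGetD A s.2 0 then (s.1, n)
          else s)
        (if PySem.List.pyGetD A 0 0 ≤ PySem.List.pyGetD A 1 0 then ((0 : Int), (1 : Int)) else (1, 0))) = F
    by_cases h1 : PySem.List.pyGetD A (2 + (m : Int)) 0 < PySem.List.pyGetD A F.1 0
    · exact ⟨F.2 :: t, by simp [PySem.List.insertBy, h1]⟩
    · by_cases h2 : PySem.List.pyGetD A (2 + (m : Int)) 0 < PySem.List.pyGetD A F.2 0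
      · exact ⟨F.2 :: t, by simp [PySem.List.insertBy, h1, h2]⟩
      · exact ⟨PySem.List.insertBy
            (fun a b => decide (PySem.List.pyGetD A a 0 < PySem.List.pyGetD A b 0))
            (2 + (m : Int)) t, by simp [PySem.List.insertBy, h1, h2]⟩

-- ===== VERDICT (by name: the statement is the Claim_ definition above) =====
theorem find_sse_spec : Claim_equal_find_sse := by
  intro A _ hpre
  unfold Pre_find_sse at hpre
  unfold Spec_find_sse find_sse find_sse_alt
  obtain ⟨m, hm⟩ : ∃ m : Nat, A.length = 2 + m := ⟨A.length - 2, by omega⟩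
  obtain ⟨t, ht⟩ := pv_invariant A m
  have hlen : PySem.List.len A = 2 + (m : Int) := by
    simp [PySem.List.len, hm]
  rw [hlen, ht]
  simp [PySem.List.pyGetD, PySem.List.pyGet?, PySem.List.pyIdx?]
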